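-- pv_equiv track=rewrite | github.com/PochariChun/jetson_test_ai_game | jetson_server/src/classification.py | calc_classification
-- ===== SOURCE A (Python) =====
-- def calc_classification(word_sentence_list, coding_syntax, learning_environment, project_assignment, stopwords):
--     ret_cs = []
--     ret_le = []
--     ret_pa = []
--     other = []
--     for word in word_sentence_list:
--         if word not in stopwords:
--             ### eliminate stopsword
--             if word in coding_syntax:
--                 ret_cs.append(word)
--             elif word in learning_environment:
--                 ret_le.append(word)
--             elif word in project_assignment:
--                 ret_pa.append(word)
--             else:
--                 other.append(word)
--
--     return ret_cs , ret_le , ret_pa , other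
-- ===== SOURCE B (Python) =====
-- def calc_classification(word_sentence_list, coding_syntax, learning_environment, project_assignment, stopwords):
--     kept = [w for w in word_sentence_list if w not in stopwords]
--     ret_cs = [w for w in kept if w in coding_syntax]
--     ret_le = [w for w in kept if w not in coding_syntax and w in learning_environment]
--     ret_pa = [w for w in kept if w not in coding_syntax and w not in learning_environment and w in project_assignment]
--     other = [w for w in kept if w not in coding_syntax and w not in learning_environment and w not in project_assignment]
--     return ret_cs, ret_le, ret_pa, other
-- ===== Notes on version B (the rewrite author's own statement) =====
-- stated objective: alternative
-- what changed: Replaces the single accumulate-into-four-lists loop by independent filter passes: one pass removes stopwords, then each bucket is produced by its own comprehension with cumulative-exclusion predicates encoding the elif priority.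
import Mathlib
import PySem

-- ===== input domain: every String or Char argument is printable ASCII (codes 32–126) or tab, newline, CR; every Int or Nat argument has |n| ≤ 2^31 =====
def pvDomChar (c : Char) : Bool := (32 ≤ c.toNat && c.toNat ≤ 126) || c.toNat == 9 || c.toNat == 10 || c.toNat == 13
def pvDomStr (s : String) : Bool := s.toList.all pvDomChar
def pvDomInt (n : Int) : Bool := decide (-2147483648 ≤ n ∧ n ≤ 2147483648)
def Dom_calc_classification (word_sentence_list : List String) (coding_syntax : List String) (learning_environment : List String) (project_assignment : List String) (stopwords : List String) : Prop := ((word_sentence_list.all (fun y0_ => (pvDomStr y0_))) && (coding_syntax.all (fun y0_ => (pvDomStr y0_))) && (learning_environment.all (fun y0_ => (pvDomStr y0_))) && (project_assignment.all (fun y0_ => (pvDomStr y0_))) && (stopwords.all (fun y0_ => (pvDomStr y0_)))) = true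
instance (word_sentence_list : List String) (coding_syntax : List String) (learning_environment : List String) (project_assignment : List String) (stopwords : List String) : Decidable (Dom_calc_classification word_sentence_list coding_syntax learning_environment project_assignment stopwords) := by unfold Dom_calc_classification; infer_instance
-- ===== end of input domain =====

-- B replaces A's single priority-cascade loop with independent filter passes (objective: alternative decomposition, same cost).

-- ===== PORT A =====
-- A: one loop over the words, appending each word to exactly one of four accumulators.
-- A's loop body as a named helper; calc_classification folds it over the words.
def pvStepA (coding_syntax learning_environment project_assignment stopwords : List String)
    (st : List String × List String × List String × List String) (word : String) :
    List String × List String × List String × List String :=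
  let (ret_cs, ret_le, ret_pa, other) := st
  if ¬ stopwords.contains word then
    if coding_syntax.contains word then (ret_cs ++ [word], ret_le, ret_pa, other)
    else if learning_environment.contains word then (ret_cs, ret_le ++ [word], ret_pa, other)
    else if project_assignment.contains word then (ret_cs, ret_le, ret_pa ++ [word], other)
    else (ret_cs, ret_le, ret_pa, other ++ [word])
  else st

def calc_classification (word_sentence_list : List String) (coding_syntax : List String) (learning_environment : List String) (project_assignment : List String) (stopwords : List String) : List String × List String × List String × List String :=
  word_sentence_list.foldl (pvStepA coding_syntax learning_environment project_assignment stopwords) ([], [], [], [])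

-- ===== PORT B =====
-- B: a stopword-removal pass, then four independent filter passes with cumulative-exclusion predicates.
def calc_classification_alt (word_sentence_list : List String) (coding_syntax : List String) (learning_environment : List String) (project_assignment : List String) (stopwords : List String) : List String × List String × List String × List String :=
  let kept := word_sentence_list.filter (fun w => ¬ stopwords.contains w)
  let ret_cs := kept.filter (fun w => coding_syntax.contains w)
  let ret_le := kept.filter (fun w => ¬ coding_syntax.contains w ∧ learning_environment.contains w)
  let ret_pa := kept.filter (fun w => ¬ coding_syntax.contains w ∧ ¬ learning_environment.contains w ∧ project_assignment.contains w)
  let other := kept.filter (fun w => ¬ coding_syntax.contains w ∧ ¬ learning_environment.contains w ∧ ¬ project_assignment.contains w)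
  (ret_cs, ret_le, ret_pa, other)

-- ===== PRECONDITION & SPEC =====
def Spec_calc_classification (word_sentence_list : List String) (coding_syntax : List String) (learning_environment : List String) (project_assignment : List String) (stopwords : List String) (out : List String × List String × List String × List String) : Prop := out = calc_classification_alt word_sentence_list coding_syntax learning_environment project_assignment stopwords
instance (word_sentence_list : List String) (coding_syntax : List String) (learning_environment : List String) (project_assignment : List String) (stopwords : List String) (out : List String × List String × List String × List String) : Decidable (Spec_calc_classification word_sentence_list coding_syntax learning_environment project_assignment stopwords out) := by unfold Spec_calc_classification; infer_instance

-- ===== CLAIM (what is proved, stated in full; the proofs are below) =====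
def Claim_equal_calc_classification : Prop := ∀ (word_sentence_list : List String) (coding_syntax : List String) (learning_environment : List String) (project_assignment : List String) (stopwords : List String), Dom_calc_classification word_sentence_list coding_syntax learning_environment project_assignment stopwords → Spec_calc_classification word_sentence_list coding_syntax learning_environment project_assignment stopwords (calc_classification word_sentence_list coding_syntax learning_environment project_assignment stopwords)

-- ===== LEMMAS AND PROOFS =====

-- A's fold with arbitrary accumulators equals the accumulators extended by B's four filters of the suffix.
theorem calc_fold_eq (cs le pa st : List String) (l acc1 acc2 acc3 acc4 : List String) :
    l.foldl (pvStepA cs le pa st) (acc1, acc2, acc3, acc4)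
    = (acc1 ++ (l.filter (fun w => ¬ st.contains w)).filter (fun w => cs.contains w),
       acc2 ++ (l.filter (fun w => ¬ st.contains w)).filter (fun w => ¬ cs.contains w ∧ le.contains w),
       acc3 ++ (l.filter (fun w => ¬ st.contains w)).filter (fun w => ¬ cs.contains w ∧ ¬ le.contains w ∧ pa.contains w),
       acc4 ++ (l.filter (fun w => ¬ st.contains w)).filter (fun w => ¬ cs.contains w ∧ ¬ le.contains w ∧ ¬ pa.contains w)) := by
  induction l generalizing acc1 acc2 acc3 acc4 with
  | nil => simp
  | cons w t ih =>
    rw [List.foldl_cons]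
    by_cases hst : w ∈ st
    · rw [show pvStepA cs le pa st (acc1, acc2, acc3, acc4) w = (acc1, acc2, acc3, acc4) from by
        simp [pvStepA, hst], ih]
      simp [List.filter_cons, hst]
    · by_cases hcs : w ∈ cs
      · rw [show pvStepA cs le pa st (acc1, acc2, acc3, acc4) w = (acc1 ++ [w], acc2, acc3, acc4) from by
          simp [pvStepA, hst, hcs], ih]
        simp [List.filter_cons, hst, hcs]
      · by_cases hle : w ∈ le
        · rw [show pvStepA cs le pa st (acc1, acc2, acc3, acc4) w = (acc1, acc2 ++ [w], acc3, acc4) from by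
            simp [pvStepA, hst, hcs, hle], ih]
          simp [List.filter_cons, hst, hcs, hle]
        · by_cases hpa : w ∈ pa
          · rw [show pvStepA cs le pa st (acc1, acc2, acc3, acc4) w = (acc1, acc2, acc3 ++ [w], acc4) from by
              simp [pvStepA, hst, hcs, hle, hpa], ih]
            simp [List.filter_cons, hst, hcs, hle, hpa]
          · rw [show pvStepA cs le pa st (acc1, acc2, acc3, acc4) w = (acc1, acc2, acc3, acc4 ++ [w]) from by
              simp [pvStepA, hst, hcs, hle, hpa], ih]
            simp [List.filter_cons, hst, hcs, hle, hpa]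

-- ===== VERDICT (by name: the statement is the Claim_ definition above) =====
theorem calc_classification_spec : Claim_equal_calc_classification := by
  intro wsl cs le pa st _
  show _ = _
  unfold calc_classification calc_classification_alt
  rw [calc_fold_eq]
  simp
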